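-- pv_equiv track=rewrite | github.com/nanshakov/database_Change_Log_extractor | report.py | get_latest_files_from_report
-- ===== SOURCE A (Python) =====
-- def get_latest_files_from_report(all_schema_files):
--     """Выбирает последние файлы из полного отчета (без сортировки)"""
--     # Группируем по папкам
--     folder_files = {}
--
--     for schema_info in all_schema_files:
--         folder = schema_info['schema_folder']
--
--         if folder not in folder_files:
--             folder_files[folder] = []
--
--         folder_files[folder].append(schema_info)
--
--     # Для каждой папки берем последний элемент из списка (как он был добавлен)
--     latest_files = []
--     for folder, files in folder_files.items():
--         # Берем последний файл из списка (без сортировки)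
--         latest_file = files[-1]
--         latest_files.append(latest_file)
--
--     return latest_files
-- ===== SOURCE B (Python) =====
-- def get_latest_files_from_report(all_schema_files):
--     """Выбирает последние файлы из полного отчета (без сортировки)"""
--     # Single pass: keep only the last-seen entry per folder; dict preserves
--     # first-seen folder order, overwriting keeps the position.
--     latest = {}
--     for schema_info in all_schema_files:
--         latest[schema_info['schema_folder']] = schema_info
--     return list(latest.values())
-- ===== Notes on version B (the rewrite author's own statement) =====
-- stated objective: simpler
-- what changed: Replaces the two-pass group-into-lists-then-take-last algorithm with a single pass that overwrites a folder->entry dict and returns its values, never materialising per-folder lists.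
import Mathlib
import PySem

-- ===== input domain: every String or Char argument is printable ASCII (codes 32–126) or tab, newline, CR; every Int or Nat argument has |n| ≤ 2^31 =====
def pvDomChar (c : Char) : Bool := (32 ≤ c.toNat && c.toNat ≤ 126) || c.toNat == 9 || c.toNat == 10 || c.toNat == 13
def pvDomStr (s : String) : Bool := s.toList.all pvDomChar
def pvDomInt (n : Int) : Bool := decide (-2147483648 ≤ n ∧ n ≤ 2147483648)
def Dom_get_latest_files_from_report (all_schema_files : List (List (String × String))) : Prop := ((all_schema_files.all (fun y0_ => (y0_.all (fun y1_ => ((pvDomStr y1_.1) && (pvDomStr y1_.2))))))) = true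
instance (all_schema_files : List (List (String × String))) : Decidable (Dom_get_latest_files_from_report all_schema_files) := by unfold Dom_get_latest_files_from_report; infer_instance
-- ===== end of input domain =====

-- B replaces A's group-into-lists-then-take-last with a single overwrite-a-dict pass (simpler).

-- ===== PORT A =====
-- schema_info['schema_folder']: first-match assoc-list lookup; KeyError (none) is excluded
-- by Pre_, so the '""' default is never reached on admitted inputs.
def pvKeyOf (info : List (String × String)) : String :=
  (PySem.Dict.mk info).getD "schema_folder" ""

-- files[-1]; every list stored by A's first loop is nonempty, so 'none' never occurs there.
def pvLastOf (files : List (List (String × String))) : List (String × String) :=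
  (PySem.List.pyGet? files (-1)).getD []

def get_latest_files_from_report (all_schema_files : List (List (String × String))) : List (List (String × String)) :=
  -- first loop: group by folder
  let folder_files : PySem.Dict String (List (List (String × String))) :=
    all_schema_files.foldl
      (fun d schema_info =>
        let folder := pvKeyOf schema_info
        let d := if d.contains folder then d else d.insert folder []
        d.modify folder [] (fun files => files ++ [schema_info]))
      PySem.Dict.empty
  -- second loop: take the last element of each folder's list
  folder_files.items.foldl (fun latest_files p => latest_files ++ [pvLastOf p.2]) []

-- ===== PORT B =====
def get_latest_files_from_report_alt (all_schema_files : List (List (String × String))) : List (List (String × String)) :=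
  (all_schema_files.foldl
      (fun latest schema_info => latest.insert (pvKeyOf schema_info) schema_info)
      PySem.Dict.empty).values

-- ===== PRECONDITION & SPEC =====
-- Pre_ excludes exactly the inputs where some entry lacks the key 'schema_folder', on which A raises KeyError.
def Pre_get_latest_files_from_report (all_schema_files : List (List (String × String))) : Prop :=
  ∀ info ∈ all_schema_files, info.any (fun p => p.1 == "schema_folder") = true
instance (all_schema_files : List (List (String × String))) : Decidable (Pre_get_latest_files_from_report all_schema_files) := by unfold Pre_get_latest_files_from_report; infer_instance

def pvWitness_get_latest_files_from_report : (List (List (String × String))) :=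
  [[("schema_folder", "a"), ("file", "x")], [("schema_folder", "a"), ("file", "y")], [("schema_folder", "b")]]

def Spec_get_latest_files_from_report (all_schema_files : List (List (String × String))) (out : List (List (String × String))) : Prop := out = get_latest_files_from_report_alt all_schema_files
instance (all_schema_files : List (List (String × String))) (out : List (List (String × String))) : Decidable (Spec_get_latest_files_from_report all_schema_files out) := by unfold Spec_get_latest_files_from_report; infer_instance

-- ===== CLAIM (what is proved, stated in full; the proofs are below) =====
def Claim_equal_get_latest_files_from_report : Prop := ∀ (all_schema_files : List (List (String × String))), Dom_get_latest_files_from_report all_schema_files → Pre_get_latest_files_from_report all_schema_files → Spec_get_latest_files_from_report all_schema_files (get_latest_files_from_report all_schema_files)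

-- ===== LEMMAS AND PROOFS =====

-- the last element of a list ending in x is x
theorem pvLastOf_append (l : List (List (String × String))) (x : List (String × String)) :
    pvLastOf (l ++ [x]) = x := by
  induction l with
  | nil => rfl
  | cons a t ih =>
    simp only [pvLastOf, List.cons_append] at *
    simp [PySem.List.pyGet?, PySem.List.pyIdx?] at *

-- A's grouping step is a single insert of the extended list
theorem stepA_eq (d : PySem.Dict String (List (List (String × String)))) (info : List (String × String)) :
    (let folder := pvKeyOf info
     let d' := if d.contains folder then d else d.insert folder []
     d'.modify folder [] (fun files => files ++ [info]))
    = d.insert (pvKeyOf info) (d.getD (pvKeyOf info) [] ++ [info]) := by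
  set f := pvKeyOf info with hf
  by_cases h : d.contains f = true
  · simp [h, PySem.Dict.modify]
  · simp only [h, if_neg, Bool.not_eq_true]
    apply PySem.Dict.ext
    have hc : (d.insert f []).contains f = true := PySem.Dict.contains_insert_self d f []
    have hnone : ∀ p ∈ d.items, (p.1 == f) = false := by
      intro p hp
      by_contra hb
      simp only [Bool.not_eq_false] at hb
      exact h (List.any_eq_true.2 ⟨p, hp, hb⟩)
    simp only [PySem.Dict.modify, PySem.Dict.getD_insert_self]
    rw [PySem.Dict.items_insert_of_contains _ _ hc,
        PySem.Dict.items_insert_of_not_contains _ ([]) (by simpa using h),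
        PySem.Dict.items_insert_of_not_contains _ _ (by simpa using h),
        PySem.Dict.getD_of_not_contains _ _ (by simpa using h)]
    simp only [List.map_append]
    rw [(List.map_congr_left (fun p hp => by simp [hnone p hp] : ∀ p ∈ d.items, _ = id p)).trans (List.map_id d.items)]
    simp

-- loop invariant: B's dict is A's dict with each grouped list replaced by its last element
theorem loops_rel (xs : List (List (String × String)))
    (d : PySem.Dict String (List (List (String × String))))
    (e : PySem.Dict String (List (String × String)))
    (h : e.items = d.items.map (fun p => (p.1, pvLastOf p.2))) :
    (xs.foldl (fun latest schema_info => latest.insert (pvKeyOf schema_info) schema_info) e).items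
    = ((xs.foldl
        (fun d schema_info =>
          let folder := pvKeyOf schema_info
          let d := if d.contains folder then d else d.insert folder []
          d.modify folder [] (fun files => files ++ [schema_info])) d)).items.map
        (fun p => (p.1, pvLastOf p.2)) := by
  induction xs generalizing d e with
  | nil => simpa using h
  | cons info t ih =>
    simp only [List.foldl_cons]
    rw [stepA_eq d info]
    apply ih
    set f := pvKeyOf info with hf
    have hkeys : e.contains f = d.contains f := by
      simp [PySem.Dict.contains, h, List.any_map, Function.comp_def]
    by_cases hc : d.contains f = true
    · rw [PySem.Dict.items_insert_of_contains _ _ (by rw [hkeys]; exact hc),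
          PySem.Dict.items_insert_of_contains _ _ hc]
      rw [h, List.map_map, List.map_map]
      apply List.map_congr_left
      intro p _
      by_cases hp : p.1 = f <;> simp [hp, pvLastOf_append]
    · rw [PySem.Dict.items_insert_of_not_contains _ _ (by rw [hkeys]; simpa using hc),
          PySem.Dict.items_insert_of_not_contains _ _ (by simpa using hc)]
      simp [h, pvLastOf_append]


-- ===== VERDICT (by name: the statement is the Claim_ definition above) =====
theorem get_latest_files_from_report_spec : Claim_equal_get_latest_files_from_report := by
  intro xs _ _
  show _ = _
  unfold get_latest_files_from_report get_latest_files_from_report_alt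
  rw [PySem.List.foldl_append_singleton_eq_map]
  rw [PySem.Dict.values, loops_rel xs PySem.Dict.empty PySem.Dict.empty rfl]
  simp [List.map_map, Function.comp]
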